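-- pv_equiv track=rewrite | github.com/leo-pol/Unif | mission 4.py | is_adn
-- ===== SOURCE A (Python) =====
-- def is_adn(s):
--     """pre : s doit etre un string
--        post: retourne si s est une sequence d'adn ou pas
-- """
--     if s == []:
--         return False
--     s = s.lower()
--     a = ('a' in s)
--     c = ('c' in s)
--     g = ('g' in s)
--     t = ('t' in s)
--
--     for i in s:
--         if i != 'a' and i != 'c' and i != 'g' and i != 't':
--             return False
--     return True
-- ===== SOURCE B (Python) =====
-- def is_adn(s):
--     t = s.lower()
--     return t.count('a') + t.count('c') + t.count('g') + t.count('t') == len(t)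
-- ===== Notes on version B (the rewrite author's own statement) =====
-- stated objective: alternative
-- what changed: Replaces A's per-character scan with early return (plus dead membership scans and a dead empty-list guard) by an arithmetic check: the occurrence counts of the four nucleotide letters in the lowered string must sum to its length.
import Mathlib
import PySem

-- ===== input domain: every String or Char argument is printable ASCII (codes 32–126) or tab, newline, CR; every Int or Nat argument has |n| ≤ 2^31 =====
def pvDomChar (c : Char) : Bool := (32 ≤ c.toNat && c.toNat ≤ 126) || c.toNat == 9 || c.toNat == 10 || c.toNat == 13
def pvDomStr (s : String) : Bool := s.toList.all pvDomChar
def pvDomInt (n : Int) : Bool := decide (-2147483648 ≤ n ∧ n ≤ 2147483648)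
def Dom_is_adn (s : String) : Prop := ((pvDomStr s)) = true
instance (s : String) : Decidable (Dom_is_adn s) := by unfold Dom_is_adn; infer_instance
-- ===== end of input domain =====

-- B replaces A's per-character scan (and its dead membership scans and dead empty-list guard)
-- by summing the occurrence counts of the four nucleotide letters and comparing with the length; objective: alternative.


-- ===== PORT A =====
-- the for-loop with early return: False on the first non-acgt character, else True
def is_adn_loop : List Char → Bool
  | [] => true
  | i :: rest =>
      if (i != 'a') && (i != 'c') && (i != 'g') && (i != 't') then false
      else is_adn_loop rest

def is_adn (s : String) : Bool :=
  -- 'if s == []: return False' — a String argument is never the empty list, so the guard never fires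
  let s' := PySem.Chars.lower s.toList
  let _a := s'.contains 'a'   -- dead in A: assigned, never read
  let _c := s'.contains 'c'
  let _g := s'.contains 'g'
  let _t := s'.contains 't'
  is_adn_loop s'

-- ===== PORT B =====
def is_adn_alt (s : String) : Bool :=
  let t := PySem.Chars.lower s.toList
  PySem.Chars.count t ['a'] + PySem.Chars.count t ['c']
    + PySem.Chars.count t ['g'] + PySem.Chars.count t ['t'] == t.length

-- ===== PRECONDITION & SPEC =====
def Spec_is_adn (s : String) (out : Bool) : Prop := out = is_adn_alt s
instance (s : String) (out : Bool) : Decidable (Spec_is_adn s out) := by unfold Spec_is_adn; infer_instance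

-- ===== CLAIM (what is proved, stated in full; the proofs are below) =====
def Claim_equal_is_adn : Prop := ∀ (s : String), Dom_is_adn s → Spec_is_adn s (is_adn s)

-- ===== LEMMAS AND PROOFS =====

lemma count_go_singleton (c : Char) (l : List Char) (fuel acc : Nat) (h : l.length ≤ fuel) :
    PySem.Chars.count.go [c] fuel l acc = acc + l.count c := by
  induction l generalizing fuel acc with
  | nil => cases fuel <;> simp [PySem.Chars.count.go]
  | cons x t ih =>
      cases fuel with
      | zero => simp at h
      | succ n =>
          simp only [List.length_cons, Nat.succ_le_succ_iff] at h
          by_cases hx : x = c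
          · subst hx
            simp [PySem.Chars.count.go, List.isPrefixOf, ih _ _ h]
            omega
          · simp [PySem.Chars.count.go, List.isPrefixOf, hx, ih _ _ h,
              Ne.symm hx]

lemma chars_count_singleton (l : List Char) (c : Char) :
    PySem.Chars.count l [c] = l.count c := by
  simpa using count_go_singleton c l l.length 0 le_rfl

lemma is_adn_loop_eq (l : List Char) :
    is_adn_loop l = l.all (fun c => c ∈ (['a', 'c', 'g', 't'] : List Char)) := by
  induction l with
  | nil => rfl
  | cons i r ih =>
      simp only [is_adn_loop, List.all_cons, ih]
      by_cases h : i ∈ (['a', 'c', 'g', 't'] : List Char)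
      · simp_all; tauto
      · simp_all

lemma counts_sum_eq_countP (l : List Char) :
    l.count 'a' + l.count 'c' + l.count 'g' + l.count 't'
      = l.countP (fun c => c ∈ (['a', 'c', 'g', 't'] : List Char)) := by
  induction l with
  | nil => rfl
  | cons x t ih =>
      simp only [List.count_cons, List.countP_cons]
      by_cases h : x ∈ (['a', 'c', 'g', 't'] : List Char) <;> simp_all;
        rcases h with h | h | h | h <;> simp_all <;> omega

-- ===== VERDICT (by name: the statement is the Claim_ definition above) =====
theorem is_adn_spec : Claim_equal_is_adn := by
  intro s _
  unfold Spec_is_adn is_adn is_adn_alt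
  simp only [chars_count_singleton, counts_sum_eq_countP, is_adn_loop_eq]
  rw [Bool.eq_iff_iff]
  simp [List.countP_eq_length, List.all_eq_true]
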